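-- pv_equiv track=rewrite | github.com/Evilnames/Collector | tapestry.py | _make_checkerboard_grid
-- ===== SOURCE A (Python) =====
-- TAPESTRY_COLS_PER_BLOCK = 16
--
-- TAPESTRY_ROWS_PER_BLOCK = 8
--
-- def _empty(h, w=1):
--     cols = w * TAPESTRY_COLS_PER_BLOCK
--     return [[False] * cols for _ in range(h * TAPESTRY_ROWS_PER_BLOCK)]
--
-- def _make_checkerboard_grid(height, width=1):
--     cols = width * TAPESTRY_COLS_PER_BLOCK
--     rows = height * TAPESTRY_ROWS_PER_BLOCK
--     g = _empty(height, width)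
--     for r in range(rows):
--         for c in range(cols):
--             if ((r // 2) + (c // 2)) % 2 == 0:
--                 g[r][c] = True
--     return g
-- ===== SOURCE B (Python) =====
-- TAPESTRY_COLS_PER_BLOCK = 16
--
-- TAPESTRY_ROWS_PER_BLOCK = 8
--
-- def _make_checkerboard_grid(height, width=1):
--     cols = width * TAPESTRY_COLS_PER_BLOCK
--     rows = height * TAPESTRY_ROWS_PER_BLOCK
--     if rows <= 0:
--         return []
--     base = [(c // 2) % 2 == 0 for c in range(cols)]
--     comp = [not b for b in base]
--     return [list(base) if (r // 2) % 2 == 0 else list(comp) for r in range(rows)]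
-- ===== Notes on version B (the rewrite author's own statement) =====
-- stated objective: simpler
-- what changed: Instead of allocating an all-false grid and mutating every cell whose (r//2)+(c//2) parity test passes, B computes the parity test once per column to build one column pattern and its complement, then assembles each row by copying one of the two according to the row's parity (and returns [] immediately for non-positive row counts).
import Mathlib
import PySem

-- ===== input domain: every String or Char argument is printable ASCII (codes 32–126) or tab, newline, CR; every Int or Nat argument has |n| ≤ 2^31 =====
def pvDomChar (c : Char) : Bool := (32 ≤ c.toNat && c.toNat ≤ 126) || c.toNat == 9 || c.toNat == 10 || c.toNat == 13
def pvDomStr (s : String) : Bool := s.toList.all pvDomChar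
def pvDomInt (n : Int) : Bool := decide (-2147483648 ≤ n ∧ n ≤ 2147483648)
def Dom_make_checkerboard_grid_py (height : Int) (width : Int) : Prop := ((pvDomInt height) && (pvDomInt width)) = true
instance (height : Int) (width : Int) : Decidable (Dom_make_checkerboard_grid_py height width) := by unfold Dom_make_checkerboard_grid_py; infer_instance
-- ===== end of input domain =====

-- B replaces A's per-cell modular test over a mutable grid by building one column pattern
-- plus its complement and selecting one per row (objective: simpler decomposition; same cost).

-- ===== PORT A =====
-- helper _empty(h, w=1)
def pyEmpty (h : Int) (w : Int) : List (List Bool) :=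
  let cols := w * 16
  (PySem.List.pyRange 0 (h * 8) 1).map (fun _ => List.replicate cols.toNat false)

def make_checkerboard_grid_py (height : Int) (width : Int) : List (List Bool) :=
  let cols := width * 16
  let rows := height * 8
  let g := pyEmpty height width
  (PySem.List.pyRange 0 rows 1).foldl (fun g r =>
    (PySem.List.pyRange 0 cols 1).foldl (fun g c =>
      if PySem.Int.mod (PySem.Int.floordiv r 2 + PySem.Int.floordiv c 2) 2 = 0 then
        -- g[r][c] = True; r and c come from range(...), so they are nonnegative
        -- in-range indices and .toNat is exact here
        g.modify r.toNat (fun row => row.set c.toNat true)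
      else g) g) g

-- ===== PORT B =====
def make_checkerboard_grid_py_alt (height : Int) (width : Int) : List (List Bool) :=
  let cols := width * 16
  let rows := height * 8
  if rows ≤ 0 then []
  else
  let base := (PySem.List.pyRange 0 cols 1).map
    (fun c => decide (PySem.Int.mod (PySem.Int.floordiv c 2) 2 = 0))
  let comp := base.map (fun b => !b)
  (PySem.List.pyRange 0 rows 1).map
    (fun r => if PySem.Int.mod (PySem.Int.floordiv r 2) 2 = 0 then base else comp)

-- ===== PRECONDITION & SPEC =====
def Spec_make_checkerboard_grid_py (height : Int) (width : Int) (out : List (List Bool)) : Prop := out = make_checkerboard_grid_py_alt height width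
instance (height : Int) (width : Int) (out : List (List Bool)) : Decidable (Spec_make_checkerboard_grid_py height width out) := by unfold Spec_make_checkerboard_grid_py; infer_instance

-- ===== CLAIM (what is proved, stated in full; the proofs are below) =====
def Claim_equal_make_checkerboard_grid_py : Prop := ∀ (height : Int) (width : Int), Dom_make_checkerboard_grid_py height width → Spec_make_checkerboard_grid_py height width (make_checkerboard_grid_py height width)

-- ===== LEMMAS AND PROOFS =====

-- range(0, n) as a Nat range
theorem pyR0 (n : Int) :
    PySem.List.pyRange 0 n 1 = (List.range n.toNat).map (fun k : Nat => (k : Int)) := by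
  rw [PySem.List.pyRange_one]
  simp only [Int.sub_zero, zero_add]

theorem set_append_len {α : Type} (A : List α) (x : α) (B : List α) (v : α) (n : Nat)
    (h : n = A.length) : (A ++ x :: B).set n v = A ++ v :: B := by
  subst h
  induction A with
  | nil => rfl
  | cons a A ih => simp [ih]

theorem modify_append_len {α : Type} (A : List α) (x : α) (B : List α) (f : α → α) (n : Nat)
    (h : n = A.length) : (A ++ x :: B).modify n f = A ++ f x :: B := by
  subst h
  induction A with
  | nil => rfl
  | cons a A ih => simpa [List.modify_succ_cons] using ih

-- inner loop over one row: setting index c to true when p c, starting from all-false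
theorem rowFold (p : Nat → Prop) [DecidablePred p] (C : Nat) : ∀ k, k ≤ C →
    (List.range k).foldl (fun (row : List Bool) c => if p c then row.set c true else row)
      (List.replicate C false)
    = (List.range k).map (fun c => decide (p c)) ++ List.replicate (C - k) false := by
  intro k
  induction k with
  | zero => simp
  | succ k ih =>
    intro hk
    have hkC : k < C := hk
    rw [List.range_succ, List.foldl_append, ih (le_of_lt hkC)]
    have hrep : List.replicate (C - k) false = false :: List.replicate (C - (k + 1)) false := by
      have h1 : C - k = (C - (k + 1)) + 1 := by omega
      rw [h1, List.replicate_succ]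
    rw [hrep]
    have hlen : k = ((List.range k).map (fun c => decide (p c))).length := by simp
    by_cases hp : p k
    · simp only [List.foldl_cons, List.foldl_nil, hp, if_true]
      rw [set_append_len _ _ _ _ _ hlen]
      simp [hp]
    · simp only [List.foldl_cons, List.foldl_nil, hp, if_false]
      simp [hp]

-- the grid-level inner loop only touches row j
theorem gridInner (p : Nat → Prop) [DecidablePred p] (j : Nat) (cs : List Nat) :
    ∀ g : List (List Bool),
    cs.foldl (fun (g : List (List Bool)) c =>
        if p c then g.modify j (fun row => row.set c true) else g) g
    = g.modify j (fun row =>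
        cs.foldl (fun (row : List Bool) c => if p c then row.set c true else row) row) := by
  induction cs with
  | nil => intro g; exact (List.modify_id _ _).symm
  | cons c cs ih =>
    intro g
    by_cases hp : p c
    · simp only [List.foldl_cons, hp, if_true, ih, List.modify_modify_eq]
      rfl
    · simp [hp, ih]

-- outer loop: after k rows, the first k rows are final and the rest still all-false
theorem outerFold (p : Nat → Nat → Prop) [inst : ∀ r c, Decidable (p r c)] (R C : Nat) :
    ∀ k, k ≤ R →
    (List.range k).foldl (fun (g : List (List Bool)) r =>
        (List.range C).foldl (fun (g : List (List Bool)) c =>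
          if p r c then g.modify r (fun row => row.set c true) else g) g)
      (List.replicate R (List.replicate C false))
    = (List.range k).map (fun r => (List.range C).map (fun c => decide (p r c)))
        ++ List.replicate (R - k) (List.replicate C false) := by
  intro k
  induction k with
  | zero => simp
  | succ k ih =>
    intro hk
    have hkR : k < R := hk
    rw [List.range_succ, List.foldl_append, ih (le_of_lt hkR)]
    simp only [List.foldl_cons, List.foldl_nil]
    rw [gridInner]
    have hrep : List.replicate (R - k) (List.replicate C false)
        = List.replicate C false :: List.replicate (R - (k + 1)) (List.replicate C false) := by
      have h1 : R - k = (R - (k + 1)) + 1 := by omega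
      rw [h1, List.replicate_succ]
    rw [hrep]
    have hlen : k = ((List.range k).map
        (fun r => (List.range C).map (fun c => decide (p r c)))).length := by
      simp
    rw [modify_append_len _ _ _ _ _ hlen, rowFold (p k) C C (le_refl C)]
    simp

-- the parity identity behind B's row/complement decomposition
theorem cell_split (r c : Nat) :
    decide (PySem.Int.mod (PySem.Int.floordiv (r : Int) 2 + PySem.Int.floordiv (c : Int) 2) 2 = 0)
    = (if PySem.Int.mod (PySem.Int.floordiv (r : Int) 2) 2 = 0
       then decide (PySem.Int.mod (PySem.Int.floordiv (c : Int) 2) 2 = 0)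
       else !decide (PySem.Int.mod (PySem.Int.floordiv (c : Int) 2) 2 = 0)) := by
  simp only [PySem.Int.floordiv_eq_ediv_of_pos (by omega : (0:Int) < 2),
    PySem.Int.mod_eq_emod_of_pos (by omega : (0:Int) < 2)]
  by_cases h : ((r : Int) / 2) % 2 = 0
  · rw [if_pos h, decide_eq_decide]
    omega
  · rw [if_neg h, ← decide_not, decide_eq_decide]
    omega

-- ===== VERDICT (by name: the statement is the Claim_ definition above) =====
theorem make_checkerboard_grid_py_spec : Claim_equal_make_checkerboard_grid_py := by
  intro height width _
  unfold Spec_make_checkerboard_grid_py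
  unfold make_checkerboard_grid_py make_checkerboard_grid_py_alt pyEmpty
  by_cases hrow : height * 8 ≤ 0
  · simp [pyR0, hrow]
  rw [if_neg hrow]
  simp only [pyR0]
  simp only [List.foldl_map, List.map_map, Function.comp_def, Int.toNat_natCast]
  have hinit : (List.range (height * 8).toNat).map
      (fun _ : Nat => List.replicate (width * 16).toNat false)
      = List.replicate (height * 8).toNat (List.replicate (width * 16).toNat false) := by
    simp [List.map_const']
  rw [hinit]
  rw [outerFold (fun r c =>
        PySem.Int.mod (PySem.Int.floordiv (r : Int) 2 + PySem.Int.floordiv (c : Int) 2) 2 = 0)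
      (height * 8).toNat (width * 16).toNat (height * 8).toNat (le_refl _)]
  simp only [Nat.sub_self, List.replicate_zero, List.append_nil]
  apply List.map_congr_left
  intro r _
  by_cases hr : PySem.Int.mod (PySem.Int.floordiv ((r : Nat) : Int) 2) 2 = 0
  · rw [if_pos hr]
    apply List.map_congr_left
    intro c _
    rw [cell_split r c, if_pos hr]
  · rw [if_neg hr]
    apply List.map_congr_left
    intro c _
    rw [cell_split r c, if_neg hr]
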